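-- pv_equiv track=rewrite | github.com/AIDMI-DataHub/heat-news-extraction | src/query/_models.py | build_broad_query
-- ===== SOURCE A (Python) =====
-- def _quote_if_multi_word(term: str) -> str:
--     """Wrap a term in double quotes if it contains spaces."""
--     if " " in term:
--         return f'"{term}"'
--     return term
--
-- def build_broad_query(terms: list[str], location: str, max_chars: int) -> str:
--     """Build a broad query that fits within a character limit.
--
--     Picks the highest-priority terms (terms are assumed priority-ordered,
--     most important first) that fit within *max_chars*. Multi-word terms are
--     double-quoted.
--
--     Args:
--         terms: Priority-ordered list of search terms.
--         location: Geographic location name.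
--         max_chars: Maximum allowed length for the full query string.
--
--     Returns:
--         Query string like ``(heatwave OR "heat stroke") Rajasthan``.
--     """
--     if not terms:
--         return location
--     # Overhead: "(" + terms_part + ") " + location
--     overhead = len(location) + 3  # space + opening paren + closing paren
--     budget = max_chars - overhead
--     selected: list[str] = []
--     used = 0
--     for t in terms:
--         term_repr = _quote_if_multi_word(t)
--         # Cost: the term itself plus " OR " separator (if not first)
--         cost = len(term_repr) + (4 if selected else 0)
--         if used + cost > budget:
--             break
--         selected.append(term_repr)
--         used += cost
--     if not selected:
--         # Last resort: truncate the first term to fit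
--         selected = [terms[0][: max(1, budget)]]
--     terms_part = " OR ".join(selected)
--     return f"({terms_part}) {location}"
-- ===== SOURCE B (Python) =====
-- def _quoted(term):
--     return f'"{term}"' if " " in term else term
--
--
-- def build_broad_query(terms, location, max_chars):
--     if not terms:
--         return location
--     budget = max_chars - (len(location) + 3)
--     reprs = [_quoted(t) for t in terms]
--     # cost of each term: the first costs its own length, later ones add " OR "
--     costs = [len(reprs[0])] + [len(r) + 4 for r in reprs[1:]]
--     cum = []
--     total = 0
--     for c in costs:
--         total += c
--         cum.append(total)
--     # cutoff: index of first cumulative cost exceeding the budget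
--     k = next((i for i, c in enumerate(cum) if c > budget), len(cum))
--     selected = reprs[:k] if k else [terms[0][:max(1, budget)]]
--     return f"({' OR '.join(selected)}) {location}"
-- ===== Notes on version B (the rewrite author's own statement) =====
-- stated objective: alternative
-- what changed: Replaces A's stateful selection loop (running total, conditional break, growing accumulator of selected terms) with a precompute-and-slice decomposition: per-term costs, a cumulative-cost list, a cutoff index found over the cumulative list, and one prefix slice.
import Mathlib
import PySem

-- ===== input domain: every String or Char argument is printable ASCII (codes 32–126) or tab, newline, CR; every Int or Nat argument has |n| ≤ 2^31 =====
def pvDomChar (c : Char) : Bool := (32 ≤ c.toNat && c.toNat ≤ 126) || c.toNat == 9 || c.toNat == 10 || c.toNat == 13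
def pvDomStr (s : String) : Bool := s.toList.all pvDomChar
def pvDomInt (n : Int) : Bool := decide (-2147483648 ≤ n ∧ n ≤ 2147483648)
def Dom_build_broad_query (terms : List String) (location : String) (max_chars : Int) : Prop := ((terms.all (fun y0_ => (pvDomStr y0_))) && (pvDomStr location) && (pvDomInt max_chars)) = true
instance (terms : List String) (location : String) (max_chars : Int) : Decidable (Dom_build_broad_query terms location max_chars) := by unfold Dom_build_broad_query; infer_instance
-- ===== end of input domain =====

-- B replaces A's stateful selection loop by precomputed per-term costs, cumulative sums and a
-- prefix-cutoff slice (objective: alternative decomposition, same result).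

-- ===== PORT A =====
-- _quote_if_multi_word
def pvQuoteA (term : String) : String :=
  if PySem.Str.isIn " " term then "\"" ++ term ++ "\"" else term

-- the 'for t in terms: … break' loop of A, state (selected, used)
def pvLoopA (budget : Int) : List String → List String → Int → List String
  | [], sel, _ => sel
  | t :: ts, sel, used =>
    let term_repr := pvQuoteA t
    let cost := PySem.Str.len term_repr + (if sel.isEmpty then 0 else 4)
    if budget < used + cost then sel
    else pvLoopA budget ts (sel ++ [term_repr]) (used + cost)

def build_broad_query (terms : List String) (location : String) (max_chars : Int) : String :=
  match terms with
  | [] => location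
  | t0 :: _ =>
    let overhead := PySem.Str.len location + 3
    let budget := max_chars - overhead
    let selected := pvLoopA budget terms [] 0
    let selected :=
      if selected.isEmpty then [PySem.Str.slice t0 none (some (max 1 budget))] else selected
    "(" ++ PySem.Str.join " OR " selected ++ ") " ++ location

-- ===== PORT B =====
-- _quoted
def pvQuoteB (term : String) : String :=
  if PySem.Str.isIn " " term then "\"" ++ term ++ "\"" else term

def build_broad_query_alt (terms : List String) (location : String) (max_chars : Int) : String :=
  match terms with
  | [] => location
  | t0 :: _ =>
    let budget := max_chars - (PySem.Str.len location + 3)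
    let reprs := terms.map pvQuoteB
    -- costs = [len(reprs[0])] + [len(r) + 4 for r in reprs[1:]]
    let costs : List Int :=
      match reprs with
      | [] => []
      | r0 :: rest => PySem.Str.len r0 :: rest.map (fun r => PySem.Str.len r + 4)
    -- cum: running total appended per cost (the 'for c in costs' loop, state (cum, total))
    let cum := (costs.foldl (fun (acc : List Int × Int) c => (acc.1 ++ [acc.2 + c], acc.2 + c))
      (([], 0) : List Int × Int)).1
    -- k = next((i for i, c in enumerate(cum) if c > budget), len(cum))
    let k := (cum.findIdx? (fun c => budget < c)).getD cum.length
    let selected :=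
      if k = 0 then [PySem.Str.slice t0 none (some (max 1 budget))] else reprs.take k
    "(" ++ PySem.Str.join " OR " selected ++ ") " ++ location

-- ===== PRECONDITION & SPEC =====
def Spec_build_broad_query (terms : List String) (location : String) (max_chars : Int) (out : String) : Prop := out = build_broad_query_alt terms location max_chars
instance (terms : List String) (location : String) (max_chars : Int) (out : String) : Decidable (Spec_build_broad_query terms location max_chars out) := by unfold Spec_build_broad_query; infer_instance

-- ===== CLAIM (what is proved, stated in full; the proofs are below) =====
def Claim_equal_build_broad_query : Prop := ∀ (terms : List String) (location : String) (max_chars : Int), Dom_build_broad_query terms location max_chars → Spec_build_broad_query terms location max_chars (build_broad_query terms location max_chars)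

-- ===== LEMMAS AND PROOFS =====

-- recursive characterisation of B's cutoff count
def pvKF : List Int → Int → Nat
  | [], _ => 0
  | c :: cs, b => if b < c then 0 else pvKF cs (b - c) + 1

lemma pvCum_cons (c : Int) (cs : List Int) :
    (List.range (c :: cs).length).map (fun i => ((c :: cs).take (i + 1)).sum)
      = c :: ((List.range cs.length).map (fun i => (cs.take (i + 1)).sum)).map (fun x => c + x) := by
  simp [List.range_succ_eq_map, List.map_map, Function.comp]


lemma pvScan_eq (cs : List Int) : ∀ (pre : List Int) (t : Int),
    (cs.foldl (fun (acc : List Int × Int) c => (acc.1 ++ [acc.2 + c], acc.2 + c)) (pre, t)).1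
      = pre ++ (List.range cs.length).map (fun i => t + (cs.take (i + 1)).sum) := by
  induction cs with
  | nil => intro pre t; simp
  | cons c cs ih =>
    intro pre t
    simp only [List.foldl_cons]
    rw [ih (pre ++ [t + c]) (t + c)]
    simp [List.range_succ_eq_map, List.map_map, Function.comp, add_assoc]

lemma pvK_eq (cs : List Int) (b : Int) :
    (((List.range cs.length).map (fun i => (cs.take (i + 1)).sum)).findIdx?
        (fun c => decide (b < c))).getD
      ((List.range cs.length).map (fun i => (cs.take (i + 1)).sum)).length = pvKF cs b := by
  simp only [List.length_map, List.length_range]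
  induction cs generalizing b with
  | nil => simp [pvKF]
  | cons c cs ih =>
    rw [pvCum_cons, List.findIdx?_cons]
    by_cases h : b < c
    · simp [h, pvKF]
    · have hpred : ((fun c1 : Int => decide (b < c1)) ∘ fun x => c + x)
          = (fun x : Int => decide (b - c < x)) := by
        funext x; by_cases hx : b - c < x <;> simp [hx] <;> omega
      rw [if_neg (by simpa using h), List.findIdx?_map, hpred]
      have hih := ih (b - c)
      cases hfi : (((List.range cs.length).map (fun i => (cs.take (i + 1)).sum)).findIdx?
          (fun x : Int => decide (b - c < x))) with
      | none => rw [hfi] at hih; simp [pvKF, h, ← hih]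
      | some i => rw [hfi] at hih; simp [pvKF, h, ← hih]

-- A's loop, once the accumulator is nonempty, is a prefix-of-reprs cutoff
lemma pvLoopA_eq (budget : Int) (ts : List String) :
    ∀ (sel : List String) (used : Int), sel ≠ [] →
      pvLoopA budget ts sel used
        = sel ++ (ts.map pvQuoteA).take
            (pvKF (ts.map (fun t => PySem.Str.len (pvQuoteA t) + 4)) (budget - used)) := by
  induction ts with
  | nil => intro sel used _; simp [pvLoopA]
  | cons t ts ih =>
    intro sel used hsel
    have hne : sel.isEmpty = false := by
      cases sel with
      | nil => exact absurd rfl hsel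
      | cons a l => rfl
    simp only [pvLoopA, hne, Bool.false_eq_true, if_false, List.map_cons, pvKF]
    by_cases h : budget < used + (PySem.Str.len (pvQuoteA t) + 4)
    · rw [if_pos h, if_pos (show budget - used < PySem.Str.len (pvQuoteA t) + 4 by omega)]
      simp
    · rw [if_neg h, if_neg (show ¬ budget - used < PySem.Str.len (pvQuoteA t) + 4 by omega)]
      rw [ih (sel ++ [pvQuoteA t]) (used + (PySem.Str.len (pvQuoteA t) + 4)) (by simp)]
      have harg : budget - (used + (PySem.Str.len (pvQuoteA t) + 4))
           = budget - used - (PySem.Str.len (pvQuoteA t) + 4) := by ring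
      rw [harg]
      simp [List.take_succ_cons]

-- A's whole loop from the empty accumulator
lemma pvLoopA_start (budget : Int) (t0 : String) (ts : List String) :
    pvLoopA budget (t0 :: ts) [] 0
      = (pvQuoteA t0 :: ts.map pvQuoteA).take
          (pvKF (PySem.Str.len (pvQuoteA t0) :: ts.map (fun t => PySem.Str.len (pvQuoteA t) + 4))
            budget) := by
  simp only [pvLoopA, List.isEmpty_nil, reduceIte, pvKF]
  by_cases h0 : budget < 0 + (PySem.Str.len (pvQuoteA t0) + 0)
  · rw [if_pos h0, if_pos (show budget < PySem.Str.len (pvQuoteA t0) by omega)]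
    simp
  · rw [if_neg h0, if_neg (show ¬ budget < PySem.Str.len (pvQuoteA t0) by omega)]
    rw [pvLoopA_eq budget ts ([] ++ [pvQuoteA t0]) (0 + (PySem.Str.len (pvQuoteA t0) + 0)) (by simp)]
    have harg : budget - (0 + (PySem.Str.len (pvQuoteA t0) + 0))
        = budget - PySem.Str.len (pvQuoteA t0) := by ring
    rw [harg]
    simp [List.take_succ_cons]

-- ===== VERDICT (by name: the statement is the Claim_ definition above) =====
theorem build_broad_query_spec : Claim_equal_build_broad_query := by
  intro terms location max_chars _hdom
  unfold Spec_build_broad_query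
  cases terms with
  | nil => rfl
  | cons t0 ts =>
    unfold build_broad_query build_broad_query_alt
    simp only [List.map_cons]
    rw [pvScan_eq]
    simp only [List.nil_append, zero_add]
    rw [pvK_eq]
    have hquote : pvQuoteB = pvQuoteA := rfl
    rw [hquote, pvLoopA_start]
    simp only [PySem.Str.len_eq, Function.comp_def, List.map_map]
    simp
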